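-- pv_equiv track=rewrite | github.com/mehrdadkh73/CS-111-Python | Xiaofan_WU_ps04_programs/wordlistOps.py | mostOccurrencesOf
-- ===== SOURCE A (Python) =====
-- def mostOccurrencesOf(s, mylist):
--     # Find the largest amount of occurrences of 's' in any word in mylist
--     numMostOccurrences = -1
--     for w in mylist:
--         if w.count(s) > numMostOccurrences:
--             numMostOccurrences = w.count(s)
--
--     # Create list of words that have the longest length
--     words = []
--     for w in mylist:
--         if w.count(s) == numMostOccurrences:
--             words.append(w)
--     return words
-- ===== SOURCE B (Python) =====
-- def mostOccurrencesOf(s, mylist):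
--     # Group words by their count of s in one pass, then return the bucket of the max count.
--     buckets = {}
--     for w in mylist:
--         buckets.setdefault(w.count(s), []).append(w)
--     if not buckets:
--         return []
--     return buckets[max(buckets)]
-- ===== Notes on version B (the rewrite author's own statement) =====
-- stated objective: simpler
-- what changed: Replaces A's two scans (max-finding pass plus filtering pass, each recomputing w.count(s)) by one pass that buckets words by their count in a dict, returning the bucket of the maximum key.
import Mathlib
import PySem

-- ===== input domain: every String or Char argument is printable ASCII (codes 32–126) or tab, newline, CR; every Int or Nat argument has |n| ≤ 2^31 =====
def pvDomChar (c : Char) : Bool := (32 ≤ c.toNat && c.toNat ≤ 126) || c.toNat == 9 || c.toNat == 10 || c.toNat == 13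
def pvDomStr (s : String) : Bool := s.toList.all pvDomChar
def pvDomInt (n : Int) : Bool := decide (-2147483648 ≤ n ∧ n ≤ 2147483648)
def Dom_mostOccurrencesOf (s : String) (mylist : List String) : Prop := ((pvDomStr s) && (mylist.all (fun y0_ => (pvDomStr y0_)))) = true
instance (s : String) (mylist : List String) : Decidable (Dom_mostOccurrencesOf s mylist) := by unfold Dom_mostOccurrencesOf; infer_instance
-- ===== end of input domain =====

-- B replaces A's two scans (each recomputing w.count(s)) by one dict-bucketing pass plus a max-key lookup; objective: simpler.

-- ===== PORT A =====
def mostOccurrencesOf (s : String) (mylist : List String) : List String :=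
  let numMostOccurrences : Int :=
    mylist.foldl (fun m w => if (PySem.Str.count w s : Int) > m then (PySem.Str.count w s : Int) else m) (-1)
  mylist.foldl (fun words w => if (PySem.Str.count w s : Int) == numMostOccurrences then words ++ [w] else words) []

-- ===== PORT B =====
def mostOccurrencesOf_alt (s : String) (mylist : List String) : List String :=
  let buckets : PySem.Dict Int (List String) :=
    mylist.foldl (fun d w => d.modify ((PySem.Str.count w s : Int)) [] (· ++ [w])) PySem.Dict.empty
  match PySem.List.max? buckets.keys (fun k => k) with
  | none => []
  | some m => buckets.getD m []

-- ===== PRECONDITION & SPEC =====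
def Spec_mostOccurrencesOf (s : String) (mylist : List String) (out : List String) : Prop := out = mostOccurrencesOf_alt s mylist
instance (s : String) (mylist : List String) (out : List String) : Decidable (Spec_mostOccurrencesOf s mylist out) := by unfold Spec_mostOccurrencesOf; infer_instance

-- ===== CLAIM (what is proved, stated in full; the proofs are below) =====
def Claim_equal_mostOccurrencesOf : Prop := ∀ (s : String) (mylist : List String), Dom_mostOccurrencesOf s mylist → Spec_mostOccurrencesOf s mylist (mostOccurrencesOf s mylist)

-- A's first loop is a running max over the counts
lemma foldl_if_gt_eq_foldl_max (c : String → Int) (l : List String) (a : Int) :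
    l.foldl (fun m w => if c w > m then c w else m) a = (l.map c).foldl max a := by
  induction l generalizing a with
  | nil => rfl
  | cons h t ih =>
    simp only [List.foldl, List.map]
    rw [ih]
    congr 1
    by_cases hc : c h > a
    · simp [hc, max_eq_right (le_of_lt hc)]
    · simp [hc, max_eq_left (le_of_not_gt hc)]

lemma foldl_max_le_int {l : List Int} {a m : Int} (ha : a ≤ m) (h : ∀ y ∈ l, y ≤ m) :
    l.foldl max a ≤ m := by
  induction l generalizing a with
  | nil => exact ha
  | cons x t ih =>
    exact ih (max_le ha (h x List.mem_cons_self)) (fun y hy => h y (List.mem_cons_of_mem _ hy))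

lemma le_foldl_max_int {l : List Int} {a m : Int} (hm : m ∈ l) : m ≤ l.foldl max a := by
  induction l generalizing a with
  | nil => cases hm
  | cons x t ih =>
    rcases List.mem_cons.mp hm with rfl | hmt
    · have hinit : ∀ (b : Int) (u : List Int), b ≤ u.foldl max b := by
        intro b u
        induction u generalizing b with
        | nil => exact le_refl b
        | cons y u2 ih2 => exact le_trans (le_max_left b y) (ih2 (max b y))
      exact le_trans (le_max_right a m) (hinit _ t)
    · exact ih hmt

lemma bucketMax_eq (c : String → Int) (h0 : ∀ w, 0 ≤ c w) (mylist : List String) :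
    (mylist.foldl (fun words w =>
        if c w == mylist.foldl (fun m w => if c w > m then c w else m) (-1) then words ++ [w] else words) [])
    = (match PySem.List.max?
          ((mylist.foldl (fun d w => d.modify (c w) [] (· ++ [w]))
            (PySem.Dict.empty : PySem.Dict Int (List String))).keys) (fun k => k) with
       | none => []
       | some m => (mylist.foldl (fun d w => d.modify (c w) [] (· ++ [w]))
            (PySem.Dict.empty : PySem.Dict Int (List String))).getD m []) := by
  have hkeys : (mylist.foldl (fun d w => d.modify (c w) [] (· ++ [w]))
      (PySem.Dict.empty : PySem.Dict Int (List String))).keys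
      = PySem.Set.ofList (mylist.map c) := by
    rw [PySem.Dict.keys_foldl_modify_key (key := c) (f := fun _ w => (· ++ [w]))]
    simp [PySem.Set.update_nil_left]
  cases hmax : PySem.List.max? ((mylist.foldl (fun d w => d.modify (c w) [] (· ++ [w]))
      (PySem.Dict.empty : PySem.Dict Int (List String))).keys) (fun k => k) with
  | none =>
    have hkn : PySem.Set.ofList (mylist.map c) = [] := by
      rw [← hkeys]; exact (PySem.List.max?_eq_none_iff _ _).mp hmax
    cases mylist with
    | nil => rfl
    | cons h t =>
      exfalso
      have hmem : c h ∈ PySem.Set.ofList ((h :: t).map c) := by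
        rw [PySem.Set.mem_ofList]; exact List.mem_map_of_mem List.mem_cons_self
      rw [hkn] at hmem
      cases hmem
  | some m =>
    have hmem : m ∈ mylist.map c := by
      have h1 := PySem.List.max?_mem hmax
      rw [hkeys, PySem.Set.mem_ofList] at h1; exact h1
    have hub : ∀ y ∈ mylist.map c, y ≤ m := by
      intro y hy
      have h2 := PySem.List.max?_isMax hmax y (by rw [hkeys, PySem.Set.mem_ofList]; exact hy)
      simpa using h2
    have hm0 : (0 : Int) ≤ m := by
      rcases List.mem_map.mp hmem with ⟨w, _, rfl⟩
      exact h0 w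
    have hM : mylist.foldl (fun m w => if c w > m then c w else m) (-1) = m := by
      rw [foldl_if_gt_eq_foldl_max]
      exact le_antisymm (foldl_max_le_int (by omega) hub) (le_foldl_max_int hmem)
    rw [hM, PySem.List.foldl_append_if_eq_filter]
    have hfold : mylist.foldl (fun d w => d.modify (c w) [] (· ++ [w]))
        (PySem.Dict.empty : PySem.Dict Int (List String))
        = (mylist.map (fun w => (c w, w))).foldl (fun d p => d.modify p.1 [] (· ++ [p.2]))
          PySem.Dict.empty := by
      rw [List.foldl_map]
    rw [hfold]
    show [] ++ List.filter (fun w => c w == m) mylist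
        = ((mylist.map (fun w => (c w, w))).foldl (fun d p => d.modify p.1 [] (· ++ [p.2]))
            (PySem.Dict.empty : PySem.Dict Int (List String))).getD m []
    rw [PySem.Dict.getD_foldl_modify_append]
    simp [List.filter_map, Function.comp_def]

-- ===== VERDICT (by name: the statement is the Claim_ definition above) =====
theorem mostOccurrencesOf_spec : Claim_equal_mostOccurrencesOf := by
  intro s mylist _
  show mostOccurrencesOf s mylist = mostOccurrencesOf_alt s mylist
  unfold mostOccurrencesOf mostOccurrencesOf_alt
  exact bucketMax_eq (fun w => (PySem.Str.count w s : Int)) (fun w => Int.natCast_nonneg _) mylist
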